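-- pv_equiv track=rewrite | github.com/ASzot/Dot-Files | scripts/convert_to_obsidian.py | replace_I_with_intuition
-- ===== SOURCE A (Python) =====
-- def replace_I_with_intuition(text):
--     result = []
--     i = 0
--     while i < len(text):
--         if text[i : i + 3] == "{I}":
--             # Remove the preceding 15 characters and the next character
--             start = max(0, len(result) - 16)
--             result = result[:start]
--             result.append("(Intuition)")
--             i += 4  # Skip "{I}" and the next character
--         else:
--             result.append(text[i])
--             i += 1
--     return "".join(result)
-- ===== SOURCE B (Python) =====
-- def replace_I_with_intuition(text):
--     # Segment-based scan: jump between "{I}" occurrences with str.find instead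
--     # of testing a slice at every character position.  The accumulator stays a
--     # list of elements (single chars plus "(Intuition)" entries) so the
--     # 16-element truncation reaches back exactly as in the per-char version.
--     result = []
--     pos = 0
--     while True:
--         idx = text.find("{I}", pos)
--         if idx == -1:
--             result.extend(text[pos:])
--             return "".join(result)
--         result.extend(text[pos:idx])
--         result = result[: max(0, len(result) - 16)]
--         result.append("(Intuition)")
--         pos = idx + 4
-- ===== Notes on version B (the rewrite author's own statement) =====
-- stated objective: alternative
-- what changed: B replaces A's per-character while-loop (testing a 3-char slice at every index) with a segment-based scan that jumps directly between '{I}' occurrences via str.find(sub, pos) and extends the accumulator a whole segment at a time.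
import Mathlib
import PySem

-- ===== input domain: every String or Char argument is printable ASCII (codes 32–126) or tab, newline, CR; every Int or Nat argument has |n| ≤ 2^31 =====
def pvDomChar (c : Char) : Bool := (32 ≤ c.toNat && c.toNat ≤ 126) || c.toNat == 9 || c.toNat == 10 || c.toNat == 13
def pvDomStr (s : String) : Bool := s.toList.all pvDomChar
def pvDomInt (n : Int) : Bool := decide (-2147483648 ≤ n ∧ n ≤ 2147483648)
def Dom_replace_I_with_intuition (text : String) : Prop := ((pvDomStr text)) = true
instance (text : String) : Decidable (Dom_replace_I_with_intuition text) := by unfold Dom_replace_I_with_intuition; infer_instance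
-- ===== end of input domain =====

-- B scans segment-wise via text.find("{I}", pos) instead of A's per-character slice test; same return value (alternative decomposition, no speed claim).

-- ===== PORT A =====
-- A's while loop over character index i with a list-of-strings accumulator.
-- text[i:i+3] == "{I}" is ported as (cs.drop i).take 3 = ['{','I','}'] (i ≥ 0, so the
-- Python slice is exactly drop-then-take); result[:max(0, len(result)-16)] is List.take
-- with Nat truncated subtraction, which equals Python's max(0, ·).
def goA (cs : List Char) (i : Nat) (result : List String) : String :=
  if h : i < cs.length then
    if (cs.drop i).take 3 = ['{', 'I', '}'] then
      goA cs (i + 4) ((result.take (result.length - 16)) ++ ["(Intuition)"])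
    else
      goA cs (i + 1) (result ++ [String.ofList [cs[i]]])
  else
    String.join result
termination_by cs.length - i
decreasing_by all_goals omega

def replace_I_with_intuition (text : String) : String :=
  goA text.toList 0 []

-- ===== PORT B =====
-- text.find("{I}", pos): first index ≥ pos at which "{I}" occurs, none for -1.
def findIFrom (cs : List Char) (pos : Nat) : Option Nat :=
  if h : pos + 3 ≤ cs.length then
    if (cs.drop pos).take 3 = ['{', 'I', '}'] then some pos
    else findIFrom cs (pos + 1)
  else none
termination_by cs.length - pos
decreasing_by omega

-- needed by goB's termination proof, hence stated above it
theorem findIFrom_some (cs : List Char) (pos idx : Nat)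
    (h : findIFrom cs pos = some idx) :
    pos ≤ idx ∧ idx + 3 ≤ cs.length ∧ (cs.drop idx).take 3 = ['{', 'I', '}'] := by
  induction pos using findIFrom.induct cs with
  | case1 p h1 h2 =>
      unfold findIFrom at h; rw [dif_pos h1, if_pos h2] at h
      cases h; exact ⟨le_refl _, h1, h2⟩
  | case2 p h1 h2 ih =>
      unfold findIFrom at h; rw [dif_pos h1, if_neg h2] at h
      have := ih h; exact ⟨by omega, this.2⟩
  | case3 p h1 =>
      unfold findIFrom at h; rw [dif_neg h1] at h; cases h

-- B's while True loop: result.extend(text[pos:idx]) appends the segment's characters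
-- as individual elements, then the 16-element truncation and the "(Intuition)" append.
def goB (cs : List Char) (pos : Nat) (result : List String) : String :=
  match h : findIFrom cs pos with
  | none => String.join (result ++ ((cs.drop pos).map (fun c => String.ofList [c])))
  | some idx =>
      let r := result ++ (((cs.drop pos).take (idx - pos)).map (fun c => String.ofList [c]))
      goB cs (idx + 4) ((r.take (r.length - 16)) ++ ["(Intuition)"])
termination_by cs.length + 4 - pos
decreasing_by
  have := findIFrom_some cs pos idx h
  omega

def replace_I_with_intuition_alt (text : String) : String :=
  goB text.toList 0 []

-- ===== PRECONDITION & SPEC =====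
def Spec_replace_I_with_intuition (text : String) (out : String) : Prop := out = replace_I_with_intuition_alt text
instance (text : String) (out : String) : Decidable (Spec_replace_I_with_intuition text out) := by unfold Spec_replace_I_with_intuition; infer_instance

-- ===== CLAIM (what is proved, stated in full; the proofs are below) =====
def Claim_equal_replace_I_with_intuition : Prop := ∀ (text : String), Dom_replace_I_with_intuition text → Spec_replace_I_with_intuition text (replace_I_with_intuition text)

-- ===== LEMMAS AND PROOFS =====

theorem findIFrom_none_step (cs : List Char) (pos : Nat)
    (h : findIFrom cs pos = none) :
    ¬ ((cs.drop pos).take 3 = ['{', 'I', '}']) ∧ findIFrom cs (pos + 1) = none := by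
  unfold findIFrom at h
  by_cases h1 : pos + 3 ≤ cs.length
  · rw [dif_pos h1] at h
    by_cases h2 : (cs.drop pos).take 3 = ['{', 'I', '}']
    · rw [if_pos h2] at h; cases h
    · rw [if_neg h2] at h; exact ⟨h2, h⟩
  · constructor
    · intro hc
      have := congrArg List.length hc
      simp at this
      omega
    · unfold findIFrom
      rw [dif_neg (by omega)]

theorem findIFrom_some_step (cs : List Char) (pos idx : Nat) (hlt : pos < idx)
    (h : findIFrom cs pos = some idx) :
    ¬ ((cs.drop pos).take 3 = ['{', 'I', '}']) ∧ findIFrom cs (pos + 1) = some idx := by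
  unfold findIFrom at h
  by_cases h1 : pos + 3 ≤ cs.length
  · rw [dif_pos h1] at h
    by_cases h2 : (cs.drop pos).take 3 = ['{', 'I', '}']
    · rw [if_pos h2] at h; cases h; omega
    · rw [if_neg h2] at h; exact ⟨h2, h⟩
  · rw [dif_neg h1] at h; cases h

theorem goB_none (cs : List Char) (pos : Nat) (result : List String)
    (h : findIFrom cs pos = none) :
    goB cs pos result
      = String.join (result ++ ((cs.drop pos).map (fun c => String.ofList [c]))) := by
  rw [goB.eq_def]
  split
  · rfl
  · next idx heq => rw [h] at heq; cases heq

theorem goB_some (cs : List Char) (pos : Nat) (result : List String) (idx : Nat)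
    (h : findIFrom cs pos = some idx) :
    goB cs pos result
      = goB cs (idx + 4)
          (((result ++ (((cs.drop pos).take (idx - pos)).map (fun c => String.ofList [c]))).take
              ((result ++ (((cs.drop pos).take (idx - pos)).map (fun c => String.ofList [c]))).length - 16))
            ++ ["(Intuition)"]) := by
  rw [goB.eq_def]
  split
  · next heq => rw [h] at heq; cases heq
  · next idx' heq =>
      rw [h] at heq
      injection heq with hh
      subst hh
      rfl

theorem goA_none (cs : List Char) (n : Nat) :
    ∀ (i : Nat) (result : List String), cs.length ≤ i + n → findIFrom cs i = none →
      goA cs i result = String.join (result ++ ((cs.drop i).map (fun c => String.ofList [c]))) := by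
  induction n with
  | zero =>
      intro i result hn h
      rw [goA, dif_neg (by omega), List.drop_eq_nil_of_le (by omega)]
      simp
  | succ n ih =>
      intro i result hn h
      obtain ⟨h2, h3⟩ := findIFrom_none_step cs i h
      by_cases hi : i < cs.length
      · rw [goA, dif_pos hi, if_neg h2, ih (i + 1) _ (by omega) h3,
            List.drop_eq_getElem_cons hi]
        simp only [List.map_cons, List.append_assoc, List.cons_append, List.nil_append]
      · rw [goA, dif_neg hi, List.drop_eq_nil_of_le (by omega)]
        simp

theorem goA_seg (cs : List Char) (idx n : Nat) :
    ∀ (i : Nat) (result : List String), idx ≤ i + n → findIFrom cs i = some idx →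
      goA cs i result
        = goA cs idx (result ++ (((cs.drop i).take (idx - i)).map (fun c => String.ofList [c]))) := by
  induction n with
  | zero =>
      intro i result hn h
      have hle := (findIFrom_some cs i idx h).1
      have he : idx = i := by omega
      subst he
      simp
  | succ n ih =>
      intro i result hn h
      have hfacts := findIFrom_some cs i idx h
      rcases Nat.eq_or_lt_of_le hfacts.1 with heq | hlt
      · subst heq
        simp
      · obtain ⟨h2, h3⟩ := findIFrom_some_step cs i idx hlt h
        have hi : i < cs.length := by omega
        rw [goA, dif_pos hi, if_neg h2, ih (i + 1) _ (by omega) h3,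
            List.drop_eq_getElem_cons hi,
            (by omega : idx - i = (idx - (i + 1)) + 1), List.take_succ_cons]
        simp only [List.map_cons, List.append_assoc, List.cons_append, List.nil_append]

theorem goA_eq_goB_fuel (cs : List Char) (n : Nat) :
    ∀ (i : Nat) (result : List String), cs.length + 4 ≤ i + n →
      goA cs i result = goB cs i result := by
  induction n with
  | zero =>
      intro i result hn
      have hnone : findIFrom cs i = none := by
        unfold findIFrom; rw [dif_neg (by omega)]
      rw [goA_none cs cs.length i result (by omega) hnone, goB_none cs i result hnone]
  | succ n ih =>
      intro i result hn
      cases hf : findIFrom cs i with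
      | none =>
          rw [goA_none cs cs.length i result (by omega) hf, goB_none cs i result hf]
      | some idx =>
          obtain ⟨hle, hlen, hmatch⟩ := findIFrom_some cs i idx hf
          rw [goA_seg cs idx cs.length i result (by omega) hf,
              goA, dif_pos (by omega : idx < cs.length), if_pos hmatch,
              goB_some cs i result idx hf]
          exact ih (idx + 4) _ (by omega)

-- ===== VERDICT (by name: the statement is the Claim_ definition above) =====
theorem replace_I_with_intuition_spec : Claim_equal_replace_I_with_intuition := by
  intro text _
  unfold Spec_replace_I_with_intuition replace_I_with_intuition replace_I_with_intuition_alt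
  exact goA_eq_goB_fuel text.toList (text.toList.length + 4) 0 [] (by omega)
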